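-- pv_equiv track=rewrite | github.com/ragib-ashab/FOL-Automated-Reasoning-Algorithm | prover.py | parse_term
-- ===== SOURCE A (Python) =====
-- from typing import List, Tuple, Dict, Set, Optional
--
-- def parse_term(tokens: List[str]) -> str:
--     name = tokens.pop(0)
--     if tokens and tokens[0] == "(":
--         tokens.pop(0)
--         args = []
--         while tokens and tokens[0] != ")":
--             args.append(parse_term(tokens))
--             if tokens and tokens[0] == ",":
--                 tokens.pop(0)
--         if tokens and tokens[0] == ")":
--             tokens.pop(0)
--         return f"{name}({','.join(args)})"
--     return name
-- ===== SOURCE B (Python) =====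
-- def parse_term(tokens):
--     # Iterative re-implementation with an explicit stack of (name, args) frames
--     # instead of recursion; performs the same front-pops on `tokens` as A.
--     name = tokens.pop(0)
--     if not (tokens and tokens[0] == "("):
--         return name
--     tokens.pop(0)
--     stack = []
--     args = []
--     while True:
--         if tokens and tokens[0] != ")":
--             t = tokens.pop(0)
--             if tokens and tokens[0] == "(":
--                 tokens.pop(0)
--                 stack.append((name, args))
--                 name, args = t, []
--                 continue
--             args.append(t)
--         else:
--             if tokens and tokens[0] == ")":
--                 tokens.pop(0)
--             result = name + "(" + ",".join(args) + ")"
--             if not stack: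
--                 return result
--             name, args = stack.pop()
--             args.append(result)
--         if tokens and tokens[0] == ",":
--             tokens.pop(0)
-- ===== Notes on version B (the rewrite author's own statement) =====
-- stated objective: alternative
-- what changed: Replaces A's recursive-descent parser (recursive calls for nested subterms) by a single iterative loop over an explicit stack of (name, args) frames that pushes on '(' and pops/formats on ')', with the same front-pop token consumption.
import Mathlib
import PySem

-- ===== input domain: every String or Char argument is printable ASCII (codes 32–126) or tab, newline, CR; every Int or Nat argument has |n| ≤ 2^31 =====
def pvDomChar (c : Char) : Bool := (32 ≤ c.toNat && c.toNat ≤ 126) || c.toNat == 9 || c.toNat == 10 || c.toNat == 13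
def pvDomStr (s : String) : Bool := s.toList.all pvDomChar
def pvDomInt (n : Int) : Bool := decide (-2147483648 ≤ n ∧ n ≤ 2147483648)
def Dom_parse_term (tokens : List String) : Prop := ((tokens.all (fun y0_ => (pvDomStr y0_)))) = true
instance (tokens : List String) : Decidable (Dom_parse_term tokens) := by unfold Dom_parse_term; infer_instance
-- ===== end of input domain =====

-- B replaces A's recursive-descent parser by an iterative loop over an explicit stack of
-- (name, args) frames (objective: alternative decomposition, same cost). Both A and B pop
-- tokens from the front of the list in the same order, so the caller-visible mutation of
-- `tokens` is identical; the equivalence proved here is about the return value.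

-- ===== PORT A =====
-- A is recursive and consumes the list; ported with a fuel parameter (tokens.length + 1 is
-- always sufficient, see lemma goA_argsA_stable below): the fuel guard only makes the same
-- computation total, it is never reached on actual inputs.
-- `if tokens and tokens[0] == "," then tokens.pop(0)`
def skipComma (r : List String) : List String :=
  if r.head? = some "," then r.tail else r

mutual
-- the body of Python A: pop the name, optionally parse a parenthesised argument list
def goA : Nat → List String → String × List String
  | 0, toks => ("", toks)   -- fuel guard (unreachable with fuel ≥ toks.length + 1)
  | f+1, toks =>
    match toks with
    | [] => ("", [])        -- `tokens.pop(0)` on empty raises in Python; excluded by Pre_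
    | name :: rest =>
      if rest.head? = some "(" then
        let p := argsA f rest.tail []
        let rest2 := if p.2.head? = some ")" then p.2.tail else p.2
        (name ++ "(" ++ String.intercalate "," p.1 ++ ")", rest2)
      else (name, rest)
-- the `while tokens and tokens[0] != ")"` loop of A
def argsA : Nat → List String → List String → List String × List String
  | 0, toks, acc => (acc, toks)
  | f+1, toks, acc =>
    match toks with
    | [] => (acc, [])
    | t :: _ =>
      if t = ")" then (acc, toks)
      else
        let p := goA f toks
        argsA f (skipComma p.2) (acc ++ [p.1])
end

def parse_term (tokens : List String) : String := (goA (tokens.length + 1) tokens).1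

-- ===== PORT B =====
-- transliteration of Source B: one loop, explicit stack of (name, args) frames; the cursor into
-- the (front-popped) token list is the remaining suffix `rest`; fuel 2*|tokens|+2 bounds the
-- loop iteration count (each iteration consumes a token or pops the stack) — the guard is
-- unreachable.
def goB : Nat → List String → List (String × List String) → String → List String → String
  | 0, _, _, _, _ => ""    -- fuel guard (unreachable)
  | f+1, rest, stack, name, args =>
    if rest.head? ≠ none ∧ rest.head? ≠ some ")" then
      let t := rest.headD ""
      let r1 := rest.tail
      if r1.head? = some "(" then
        goB f r1.tail ((name, args) :: stack) t []
      else
        goB f (skipComma r1) stack name (args ++ [t])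
    else
      let r2 := if rest.head? = some ")" then rest.tail else rest
      let result := name ++ "(" ++ String.intercalate "," args ++ ")"
      match stack with
      | [] => result
      | (pn, pa) :: st => goB f (skipComma r2) st pn (pa ++ [result])

def parse_term_alt (tokens : List String) : String :=
  match tokens with
  | [] => ""               -- `tokens.pop(0)` on empty raises in Python; excluded by Pre_
  | t0 :: rest =>
    if rest.head? = some "(" then
      goB (2 * tokens.length + 2) rest.tail [] t0 []
    else t0

-- ===== PRECONDITION & SPEC =====
-- Pre_ excludes only the empty list, on which both A and B raise IndexError (pop from empty list).
def Pre_parse_term (tokens : List String) : Prop := tokens ≠ []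
instance (tokens : List String) : Decidable (Pre_parse_term tokens) := by unfold Pre_parse_term; infer_instance
def pvWitness_parse_term : List String := ["f", "(", "x", ",", "g", "(", "y", ")", ")"]

def Spec_parse_term (tokens : List String) (out : String) : Prop := out = parse_term_alt tokens
instance (tokens : List String) (out : String) : Decidable (Spec_parse_term tokens out) := by unfold Spec_parse_term; infer_instance

-- ===== CLAIM (what is proved, stated in full; the proofs are below) =====
def Claim_equal_parse_term : Prop := ∀ (tokens : List String), Dom_parse_term tokens → Pre_parse_term tokens → Spec_parse_term tokens (parse_term tokens)

-- ===== LEMMAS AND PROOFS =====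

lemma skipComma_length (r : List String) : (skipComma r).length ≤ r.length := by
  unfold skipComma; split
  · simp [List.length_tail]
  · exact Nat.le_refl _

-- one-step unfolding equations for A's fueled mutual recursion
lemma goA_nil_eq (f : Nat) : goA (f+1) [] = ("", []) := rfl

lemma goA_eq (f : Nat) (name : String) (rest : List String) :
    goA (f+1) (name :: rest) =
      if rest.head? = some "(" then
        (name ++ "(" ++ String.intercalate "," (argsA f rest.tail []).1 ++ ")",
         if (argsA f rest.tail []).2.head? = some ")" then (argsA f rest.tail []).2.tail
         else (argsA f rest.tail []).2)
      else (name, rest) := rfl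

lemma goA_paren_eq (f : Nat) (name : String) (rr : List String) :
    goA (f+1) (name :: "(" :: rr) =
      (name ++ "(" ++ String.intercalate "," (argsA f rr []).1 ++ ")",
       if (argsA f rr []).2.head? = some ")" then (argsA f rr []).2.tail
       else (argsA f rr []).2) := by
  rw [goA_eq]; simp

lemma argsA_nil_eq (f : Nat) (acc : List String) : argsA (f+1) [] acc = (acc, []) := rfl

lemma argsA_eq (f : Nat) (t : String) (rest acc : List String) :
    argsA (f+1) (t :: rest) acc =
      if t = ")" then (acc, t :: rest)
      else argsA f (skipComma (goA f (t :: rest)).2) (acc ++ [(goA f (t :: rest)).1]) := rfl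

-- fuel stability and token consumption for A's two mutually recursive loops
lemma goA_argsA_stable : ∀ f : Nat,
    (∀ g toks, toks.length < f → toks.length < g → goA f toks = goA g toks) ∧
    (∀ toks, toks.length < f → toks ≠ [] → (goA f toks).2.length < toks.length) ∧
    (∀ g toks acc, toks.length + 1 < f → toks.length + 1 < g → argsA f toks acc = argsA g toks acc) ∧
    (∀ toks acc, toks.length + 1 < f → (argsA f toks acc).2.length ≤ toks.length) := by
  intro f
  induction f using Nat.strong_induction_on with
  | _ f IH =>
  match f with
  | 0 => exact ⟨fun g toks h => absurd h (Nat.not_lt_zero _), fun toks h => absurd h (Nat.not_lt_zero _),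
      fun g toks acc h => absurd h (Nat.not_lt_zero _), fun toks acc h => absurd h (Nat.not_lt_zero _)⟩
  | f'+1 =>
    have IH' := IH f' (Nat.lt_succ_self _)
    refine ⟨?_, ?_, ?_, ?_⟩
    · -- goA stability
      intro g toks hf hg
      match g with
      | 0 => exact absurd hg (Nat.not_lt_zero _)
      | g'+1 =>
        match toks with
        | [] => rw [goA_nil_eq, goA_nil_eq]
        | name :: rest =>
          by_cases hpar : rest.head? = some "("
          · match rest with
            | [] => simp at hpar
            | r0 :: rr =>
              rw [List.head?_cons, Option.some.injEq] at hpar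
              subst hpar
              rw [goA_paren_eq, goA_paren_eq]
              simp only [List.length_cons] at hf hg
              rw [IH'.2.2.1 g' rr [] (by omega) (by omega)]
          · rw [goA_eq, goA_eq, if_neg hpar, if_neg hpar]
    · -- goA consumption
      intro toks hf hne
      match toks with
      | [] => exact absurd rfl hne
      | name :: rest =>
        by_cases hpar : rest.head? = some "("
        · match rest with
          | [] => simp at hpar
          | r0 :: rr =>
            rw [List.head?_cons, Option.some.injEq] at hpar
            subst hpar
            rw [goA_paren_eq]
            simp only [List.length_cons] at hf ⊢
            have hc := IH'.2.2.2 rr [] (by omega)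
            split
            · have h2 : (argsA f' rr []).2.tail.length = (argsA f' rr []).2.length - 1 :=
                List.length_tail
              omega
            · omega
        · rw [goA_eq, if_neg hpar]
          simp only [List.length_cons]
          omega
    · -- argsA stability
      intro g toks acc hf hg
      match g with
      | 0 => exact absurd hg (Nat.not_lt_zero _)
      | g'+1 =>
        match toks with
        | [] => rw [argsA_nil_eq, argsA_nil_eq]
        | t :: rest =>
          rw [argsA_eq, argsA_eq]
          by_cases hcl : t = ")"
          · rw [if_pos hcl, if_pos hcl]
          · rw [if_neg hcl, if_neg hcl]
            simp only [List.length_cons] at hf hg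
            have heq : goA f' (t :: rest) = goA g' (t :: rest) :=
              IH'.1 g' (t :: rest) (by simp; omega) (by simp; omega)
            rw [heq]
            have hc : (goA g' (t :: rest)).2.length < (t :: rest).length := by
              rw [← heq]
              exact IH'.2.1 (t :: rest) (by simp; omega) (by simp)
            have hsk := skipComma_length (goA g' (t :: rest)).2
            simp only [List.length_cons] at hc
            exact IH'.2.2.1 g' _ (acc ++ [(goA g' (t :: rest)).1]) (by omega) (by omega)
    · -- argsA consumption
      intro toks acc hf
      match toks with
      | [] => rw [argsA_nil_eq]
      | t :: rest =>
        rw [argsA_eq]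
        by_cases hcl : t = ")"
        · rw [if_pos hcl]
        · rw [if_neg hcl]
          simp only [List.length_cons] at hf
          have hc := IH'.2.1 (t :: rest) (by simp; omega) (by simp)
          have hsk := skipComma_length (goA f' (t :: rest)).2
          simp only [List.length_cons] at hc
          have hr := IH'.2.2.2 (skipComma (goA f' (t :: rest)).2)
            (acc ++ [(goA f' (t :: rest)).1]) (by omega)
          simp only [List.length_cons]
          omega

-- canonical (fuel-free) views of A's loops
def AgoA (toks : List String) : String × List String := goA (toks.length + 1) toks
def AargsA (toks : List String) (acc : List String) : List String × List String :=
  argsA (toks.length + 2) toks acc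

lemma AgoA_consume (toks : List String) (h : toks ≠ []) : (AgoA toks).2.length < toks.length :=
  (goA_argsA_stable (toks.length + 1)).2.1 toks (Nat.lt_succ_self _) h

lemma AgoA_paren (name : String) (rr : List String) :
    AgoA (name :: "(" :: rr) =
      (name ++ "(" ++ String.intercalate "," (AargsA rr []).1 ++ ")",
        if (AargsA rr []).2.head? = some ")" then (AargsA rr []).2.tail else (AargsA rr []).2) := by
  show goA (rr.length + 2 + 1) (name :: "(" :: rr) = _
  rw [show rr.length + 2 + 1 = (rr.length + 2) + 1 from rfl, goA_paren_eq]
  rfl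

lemma AgoA_noparen (name : String) (rest : List String) (h : rest.head? ≠ some "(") :
    AgoA (name :: rest) = (name, rest) := by
  show goA (rest.length + 1 + 1) (name :: rest) = _
  rw [goA_eq, if_neg h]

lemma AargsA_nil (acc : List String) : AargsA [] acc = (acc, []) := rfl

lemma AargsA_close (rest acc : List String) : AargsA (")" :: rest) acc = (acc, ")" :: rest) := by
  show argsA (rest.length + 1 + 2) (")" :: rest) acc = _
  rw [show rest.length + 1 + 2 = (rest.length + 2) + 1 from rfl, argsA_eq, if_pos rfl]

lemma AargsA_cons (t : String) (rest acc : List String) (h : t ≠ ")") :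
    AargsA (t :: rest) acc =
      AargsA (skipComma (AgoA (t :: rest)).2) (acc ++ [(AgoA (t :: rest)).1]) := by
  show argsA (rest.length + 1 + 2) (t :: rest) acc = _
  rw [show rest.length + 1 + 2 = (rest.length + 2) + 1 from rfl, argsA_eq, if_neg h]
  have hgo : goA (rest.length + 2) (t :: rest) = AgoA (t :: rest) := rfl
  rw [hgo]
  have hcons : (AgoA (t :: rest)).2.length < (t :: rest).length :=
    AgoA_consume (t :: rest) (by simp)
  have hsk := skipComma_length (AgoA (t :: rest)).2
  simp only [List.length_cons] at hcons
  exact (goA_argsA_stable (rest.length + 2)).2.2.1 _ _ _ (by omega) (by omega)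

-- A-side meaning of a B machine state: finish the current frame with A's argument loop,
-- then unwind the remaining stack the way the recursive calls of A would
def unwindA : List (String × List String) → List String → String → List String → String
  | stack, rest, name, args =>
    let p := AargsA rest args
    let r2 := if p.2.head? = some ")" then p.2.tail else p.2
    let result := name ++ "(" ++ String.intercalate "," p.1 ++ ")"
    match stack with
    | [] => result
    | (pn, pa) :: st => unwindA st (skipComma r2) pn (pa ++ [result])

lemma unwindA_nil (rest : List String) (name : String) (args : List String) :
    unwindA [] rest name args =
      name ++ "(" ++ String.intercalate "," (AargsA rest args).1 ++ ")" := rfl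

lemma unwindA_cons (pn : String) (pa : List String) (st : List (String × List String))
    (rest : List String) (name : String) (args : List String) :
    unwindA ((pn, pa) :: st) rest name args =
      unwindA st
        (skipComma (if (AargsA rest args).2.head? = some ")" then (AargsA rest args).2.tail
          else (AargsA rest args).2))
        pn (pa ++ [name ++ "(" ++ String.intercalate "," (AargsA rest args).1 ++ ")"]) := rfl

lemma unwindA_congr (stack : List (String × List String)) (name : String)
    {rest args rest' args' : List String} (h : AargsA rest args = AargsA rest' args') :
    unwindA stack rest name args = unwindA stack rest' name args' := by
  match stack with
  | [] => rw [unwindA_nil, unwindA_nil, h]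
  | (pn, pa) :: st => rw [unwindA_cons, unwindA_cons, h]

lemma unwindA_push (stack : List (String × List String)) (t : String) (rr : List String)
    (name : String) (args : List String) (h : t ≠ ")") :
    unwindA stack (t :: "(" :: rr) name args = unwindA ((name, args) :: stack) rr t [] := by
  rw [unwindA_cons]
  exact unwindA_congr stack name (by rw [AargsA_cons t ("(" :: rr) args h, AgoA_paren t rr])

lemma unwindA_simple (stack : List (String × List String)) (t : String) (r1 : List String)
    (name : String) (args : List String) (h : t ≠ ")") (hp : r1.head? ≠ some "(") :
    unwindA stack (t :: r1) name args = unwindA stack (skipComma r1) name (args ++ [t]) := by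
  exact unwindA_congr stack name (by rw [AargsA_cons t r1 args h, AgoA_noparen t r1 hp])

-- one-step unfolding equations for B's loop
lemma goB_nil_eq (f : Nat) (stack : List (String × List String)) (name : String)
    (args : List String) :
    goB (f+1) [] stack name args =
      (match stack with
       | [] => name ++ "(" ++ String.intercalate "," args ++ ")"
       | (pn, pa) :: st =>
          goB f [] st pn (pa ++ [name ++ "(" ++ String.intercalate "," args ++ ")"])) := by
  simp [goB, skipComma]

lemma goB_close_eq (f : Nat) (r1 : List String) (stack : List (String × List String))
    (name : String) (args : List String) :
    goB (f+1) (")" :: r1) stack name args =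
      (match stack with
       | [] => name ++ "(" ++ String.intercalate "," args ++ ")"
       | (pn, pa) :: st =>
          goB f (skipComma r1) st pn (pa ++ [name ++ "(" ++ String.intercalate "," args ++ ")"])) := by
  simp [goB]

lemma goB_cons_eq (f : Nat) (t : String) (r1 : List String)
    (stack : List (String × List String)) (name : String) (args : List String) (h : t ≠ ")") :
    goB (f+1) (t :: r1) stack name args =
      if r1.head? = some "(" then goB f r1.tail ((name, args) :: stack) t []
      else goB f (skipComma r1) stack name (args ++ [t]) := by
  simp [goB, h]

-- the simulation: B's stack machine computes unwindA, given enough fuel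
lemma goB_sim : ∀ f rest stack name args, 2 * rest.length + stack.length < f →
    goB f rest stack name args = unwindA stack rest name args := by
  intro f
  induction f using Nat.strong_induction_on with
  | _ f IH =>
  match f with
  | 0 => intro rest stack name args h; exact absurd h (Nat.not_lt_zero _)
  | f'+1 =>
    intro rest stack name args h
    match rest with
    | [] =>
      rw [goB_nil_eq]
      match stack with
      | [] => rw [unwindA_nil, AargsA_nil]
      | (pn, pa) :: st =>
        show goB f' [] st pn (pa ++ [name ++ "(" ++ String.intercalate "," args ++ ")"]) =
          unwindA ((pn, pa) :: st) [] name args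
        rw [IH f' (Nat.lt_succ_self _) [] st pn _ (by simp at h ⊢; omega)]
        rw [unwindA_cons, AargsA_nil]
        exact unwindA_congr st pn (by simp [skipComma])
    | t :: r1 =>
      by_cases hcl : t = ")"
      · subst hcl
        rw [goB_close_eq]
        match stack with
        | [] => rw [unwindA_nil, AargsA_close]
        | (pn, pa) :: st =>
          show goB f' (skipComma r1) st pn (pa ++ [name ++ "(" ++ String.intercalate "," args ++ ")"]) =
            unwindA ((pn, pa) :: st) (")" :: r1) name args
          have hsk := skipComma_length r1
          rw [IH f' (Nat.lt_succ_self _) (skipComma r1) st pn _ (by simp at h ⊢; omega)]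
          rw [unwindA_cons, AargsA_close]
          exact unwindA_congr st pn (by simp)
      · rw [goB_cons_eq f' t r1 stack name args hcl]
        by_cases hp : r1.head? = some "("
        · match r1 with
          | [] => simp at hp
          | r0 :: rr =>
            rw [List.head?_cons, Option.some.injEq] at hp
            subst hp
            rw [if_pos (show ("(" :: rr).head? = some "(" from rfl), List.tail_cons]
            rw [IH f' (Nat.lt_succ_self _) rr ((name, args) :: stack) t [] (by simp at h ⊢; omega)]
            exact (unwindA_push stack t rr name args hcl).symm
        · rw [if_neg hp]
          have hsk := skipComma_length r1
          rw [IH f' (Nat.lt_succ_self _) (skipComma r1) stack name (args ++ [t]) (by simp at h ⊢; omega)]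
          exact (unwindA_simple stack t r1 name args hcl hp).symm

-- ===== VERDICT (by name: the statement is the Claim_ definition above) =====
theorem parse_term_spec : Claim_equal_parse_term := by
  intro tokens _hdom hpre
  unfold Spec_parse_term
  match tokens with
  | [] => exact absurd rfl hpre
  | t0 :: rest =>
    by_cases hpar : rest.head? = some "("
    · match rest with
      | [] => simp at hpar
      | r0 :: rr =>
        rw [List.head?_cons, Option.some.injEq] at hpar
        subst hpar
        have hA : parse_term (t0 :: "(" :: rr) = (AgoA (t0 :: "(" :: rr)).1 := rfl
        have hB : parse_term_alt (t0 :: "(" :: rr) =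
            goB (2 * (t0 :: "(" :: rr).length + 2) rr [] t0 [] := by
          show (if ("(" :: rr).head? = some "(" then
              goB (2 * (t0 :: "(" :: rr).length + 2) ("(" :: rr).tail [] t0 [] else t0) = _
          rw [if_pos (show ("(" :: rr).head? = some "(" from rfl), List.tail_cons]
        rw [hA, AgoA_paren, hB]
        rw [goB_sim (2 * (t0 :: "(" :: rr).length + 2) rr [] t0 [] (by simp; omega)]
        rw [unwindA_nil]
    · have hA : parse_term (t0 :: rest) = (AgoA (t0 :: rest)).1 := rfl
      have hB : parse_term_alt (t0 :: rest) =
          (if rest.head? = some "(" then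
            goB (2 * (t0 :: rest).length + 2) rest.tail [] t0 [] else t0) := rfl
      rw [hA, AgoA_noparen t0 rest hpar, hB, if_neg hpar]
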